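-- pv_equiv track=rewrite | github.com/AxeH666/internal-payment-system | docs_check.py | check_forbidden_terms
-- ===== SOURCE A (Python) =====
-- FORBIDDEN_TERMS = [
--     "multi-tenant",
--     "multi tenancy",
--     "ledger",
--     "gst",
--     "SaaS",
--     "external integration",
--     "bank integration",
--     "mobile app",
--     "etc.",
--     "may include",
--     "future phase",
-- ]
--
-- def get_content_excluding_sections(content, section_headers):
--     """Return content with exclusion sections removed for forbidden-term checking."""
--     lines = content.split("\n")
--     result = []
--     skip = False
--     for line in lines:
--         stripped = line.strip()
--         if stripped.startswith("##"):
--             in_exclusion = any(header in line for header in section_headers)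
--             skip = in_exclusion
--         if skip:
--             continue
--         result.append(line)
--     return "\n".join(result)
--
-- EXCLUSION_CONTEXT = (
--     "exclude",
--     "no ",
--     "without",
--     "out of scope",
--     "not in scope",
--     "non-goal",
--     "non-goals",
-- )
--
-- def check_forbidden_terms(content):
--     exclusion_sections = [
--         "Explicit Non-Goals",
--         "Explicit Domain Exclusions",
--     ]
--     content_to_check = get_content_excluding_sections(content, exclusion_sections)
--     found = []
--     lower_content = content_to_check.lower()
--     lower_lines = content_to_check.split("\n")
--     for term in FORBIDDEN_TERMS:
--         term_lower = term.lower()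
--         if term_lower not in lower_content:
--             continue
--         for i, line in enumerate(lower_lines):
--             if term_lower in line:
--                 in_exclusion_context = any(ctx in line for ctx in EXCLUSION_CONTEXT)
--                 if not in_exclusion_context:
--                     found.append(term)
--                     break
--     return found
-- ===== SOURCE B (Python) =====
-- FORBIDDEN_TERMS = [
--     "multi-tenant",
--     "multi tenancy",
--     "ledger",
--     "gst",
--     "SaaS",
--     "external integration",
--     "bank integration",
--     "mobile app",
--     "etc.",
--     "may include",
--     "future phase",
-- ]
--
-- EXCLUSION_CONTEXT = (
--     "exclude",
--     "no ",
--     "without",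
--     "out of scope",
--     "not in scope",
--     "non-goal",
--     "non-goals",
-- )
--
-- def check_forbidden_terms(content):
--     headers = ("Explicit Non-Goals", "Explicit Domain Exclusions")
--     lowered = [(term, term.lower()) for term in FORBIDDEN_TERMS]
--     found = set()
--     skip = False
--     for line in content.split("\n"):
--         if line.strip().startswith("##"):
--             skip = any(h in line for h in headers)
--         if skip or any(ctx in line for ctx in EXCLUSION_CONTEXT):
--             continue
--         for term, low in lowered:
--             if low in line:
--                 found.add(term)
--     return [term for term, _ in lowered if term in found]
-- ===== Notes on version B (the rewrite author's own statement) =====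
-- stated objective: alternative
-- what changed: Replaces A's two-phase term-major scan (first build the filtered content by joining kept lines, then per term a whole-content substring pre-check plus a loop over the re-split lines with an early break) by one streaming line-major pass that threads the section-skip flag and accumulates hits in a set, emitting FORBIDDEN_TERMS in order at the end; the filtered content string is never materialised.
import Mathlib
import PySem

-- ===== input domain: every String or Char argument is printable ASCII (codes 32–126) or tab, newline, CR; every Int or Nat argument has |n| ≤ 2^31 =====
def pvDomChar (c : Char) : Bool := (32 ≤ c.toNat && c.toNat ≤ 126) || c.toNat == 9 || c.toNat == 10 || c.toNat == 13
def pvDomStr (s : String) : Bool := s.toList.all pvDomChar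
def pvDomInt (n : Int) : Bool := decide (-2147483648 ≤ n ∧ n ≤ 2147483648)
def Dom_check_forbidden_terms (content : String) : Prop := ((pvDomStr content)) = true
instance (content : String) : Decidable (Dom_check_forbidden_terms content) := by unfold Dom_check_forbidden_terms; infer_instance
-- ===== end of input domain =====

-- B replaces A's two-phase term-major scan (build the filtered content, then per term a whole-content
-- pre-check plus a per-term loop over the re-split lines with early break) by ONE streaming line-major
-- pass threading the section-skip flag and accumulating hits in a set (objective: alternative).

-- ===== PORT A =====
-- module constants (shared by both ports, as in the Python module)
def pvForbidden : List String :=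
  ["multi-tenant", "multi tenancy", "ledger", "gst", "SaaS", "external integration",
   "bank integration", "mobile app", "etc.", "may include", "future phase"]

def pvCtxList : List (List Char) :=
  ["exclude".toList, "no ".toList, "without".toList, "out of scope".toList,
   "not in scope".toList, "non-goal".toList, "non-goals".toList]

-- any(ctx in line for ctx in EXCLUSION_CONTEXT)
def pvCtxAny (line : List Char) : Bool := pvCtxList.any (fun ctx => PySem.Chars.isIn ctx line)

-- get_content_excluding_sections, module helper used by A (strings handled as List Char throughout)
def pvGces (content : List Char) (headers : List (List Char)) : List Char :=
  let lines := PySem.Chars.splitOn content ['\n']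
  let st := lines.foldl
    (fun (st : List (List Char) × Bool) line =>
      let skip := if PySem.Chars.startswith (PySem.Chars.strip line) ['#', '#']
                  then headers.any (fun h => PySem.Chars.isIn h line) else st.2
      if skip then (st.1, skip) else (st.1 ++ [line], skip))
    ([], false)
  PySem.Chars.join ['\n'] st.1

-- A's inner per-term loop over the lines, with its early break and `continue` past exclusion-context lines
def pvInnerA (term : String) (tl : List Char) (lines : List (List Char)) (found : List String) :
    List String :=
  match lines with
  | [] => found
  | line :: rest =>
      if PySem.Chars.isIn tl line then
        if pvCtxAny line then pvInnerA term tl rest found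
        else found ++ [term]
      else pvInnerA term tl rest found

def check_forbidden_terms (content : String) : List String :=
  let ctc := pvGces content.toList ["Explicit Non-Goals".toList, "Explicit Domain Exclusions".toList]
  let lc := PySem.Chars.lower ctc
  let lines := PySem.Chars.splitOn ctc ['\n']
  pvForbidden.foldl
    (fun found term =>
      let tl := PySem.Chars.lower term.toList
      if PySem.Chars.isIn tl lc then pvInnerA term tl lines found else found)
    []

-- ===== PORT B =====
-- single pass over the raw lines: thread the skip flag, collect hits into a set, emit in order
def check_forbidden_terms_alt (content : String) : List String :=
  let headers : List (List Char) :=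
    ["Explicit Non-Goals".toList, "Explicit Domain Exclusions".toList]
  let lowered : List (String × List Char) :=
    pvForbidden.map (fun term => (term, PySem.Chars.lower term.toList))
  let st := (PySem.Chars.splitOn content.toList ['\n']).foldl
    (fun (st : Bool × PySem.Set String) line =>
      let skip := if PySem.Chars.startswith (PySem.Chars.strip line) ['#', '#']
                  then headers.any (fun h => PySem.Chars.isIn h line) else st.1
      if skip || pvCtxAny line then (skip, st.2)
      else (skip,
        lowered.foldl
          (fun found p => if PySem.Chars.isIn p.2 line then PySem.Set.add found p.1 else found)
          st.2))
    (false, PySem.Set.empty)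
  (lowered.filter (fun p => PySem.Set.contains st.2 p.1)).map (fun p => p.1)

-- ===== PRECONDITION & SPEC =====
def Spec_check_forbidden_terms (content : String) (out : List String) : Prop := out = check_forbidden_terms_alt content
instance (content : String) (out : List String) : Decidable (Spec_check_forbidden_terms content out) := by unfold Spec_check_forbidden_terms; infer_instance

-- ===== CLAIM (what is proved, stated in full; the proofs are below) =====
def Claim_equal_check_forbidden_terms : Prop := ∀ (content : String), Dom_check_forbidden_terms content → Spec_check_forbidden_terms content (check_forbidden_terms content)

-- ===== LEMMAS AND PROOFS =====

-- abbreviations used only by the proofs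
def pvHeaders : List (List Char) :=
  ["Explicit Non-Goals".toList, "Explicit Domain Exclusions".toList]

def pvStep (line : List Char) (sk : Bool) : Bool :=
  if PySem.Chars.startswith (PySem.Chars.strip line) ['#', '#']
  then pvHeaders.any (fun h => PySem.Chars.isIn h line) else sk

-- the kept (non-skipped) lines, as a structural recursion
def pvKept : List (List Char) → Bool → List (List Char)
  | [], _ => []
  | l :: ls, sk =>
      let sk' := pvStep l sk
      if sk' then pvKept ls sk' else l :: pvKept ls sk'

-- "line contributes term t": term occurs and the line is not in exclusion context
def pvP (t : String) (line : List Char) : Bool :=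
  PySem.Chars.isIn (PySem.Chars.lower t.toList) line && !pvCtxAny line

-- ---------- A-side characterisation (as in the Python: per-term scan) ----------

theorem pvInnerA_eq (term : String) (tl : List Char) (lines : List (List Char))
    (found : List String) :
    pvInnerA term tl lines found =
      if lines.any (fun line => PySem.Chars.isIn tl line && !pvCtxAny line) then found ++ [term]
      else found := by
  induction lines with
  | nil => simp [pvInnerA]
  | cons line rest ih =>
      simp only [pvInnerA, List.any_cons]
      by_cases h1 : PySem.Chars.isIn tl line = true <;>
        by_cases h2 : pvCtxAny line = true <;>
          simp [h1, h2, ih]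

-- every piece produced by splitOn.go is an infix of s, given the loop invariant
theorem pvGo_infix (sep : List Char) (s : List Char) :
    ∀ (fuel : Nat) (l cur : List Char) (acc : List (List Char)),
      cur.reverse ++ l <:+: s → (∀ a ∈ acc, a <:+: s) →
      ∀ x ∈ PySem.Chars.splitOn.go sep fuel l cur acc, x <:+: s := by
  intro fuel
  induction fuel with
  | zero =>
      intro l cur acc h1 h2 x hx
      simp only [PySem.Chars.splitOn.go, List.mem_reverse, List.mem_cons] at hx
      rcases hx with rfl | hx
      · exact h1
      · exact h2 x hx
  | succ fuel ih =>
      intro l cur acc h1 h2 x hx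
      cases l with
      | nil =>
          simp only [PySem.Chars.splitOn.go, List.mem_reverse, List.mem_cons] at hx
          rcases hx with rfl | hx
          · simpa using h1
          · exact h2 x hx
      | cons c rest =>
          simp only [PySem.Chars.splitOn.go] at hx
          by_cases hp : sep.isPrefixOf (c :: rest) = true
          · rw [if_pos hp] at hx
            refine ih _ [] (cur.reverse :: acc) ?_ ?_ x hx
            · have hl : List.drop sep.length (c :: rest) <:+ (c :: rest) := List.drop_suffix _ _
              have hcr : (c :: rest : List Char) <:+: s :=
                List.IsInfix.trans ⟨cur.reverse, [], by simp⟩ h1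
              simpa using List.IsInfix.trans hl.isInfix hcr
            · intro a ha
              rcases List.mem_cons.mp ha with rfl | ha
              · exact List.IsInfix.trans ⟨[], c :: rest, by simp⟩ h1
              · exact h2 a ha
          · rw [if_neg hp] at hx
            refine ih rest (c :: cur) acc ?_ h2 x hx
            simpa using h1

theorem pv_infix_of_mem_splitOn (s sep line : List Char)
    (h : line ∈ PySem.Chars.splitOn s sep) : line <:+: s := by
  unfold PySem.Chars.splitOn at h
  exact pvGo_infix sep s (s.length + 1) s [] [] (by simp) (by simp) line h

-- A's whole-content pre-check is implied by a per-line hit (for a lowercase pattern)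
theorem pv_precheck (ctc tl line : List Char) (hidem : PySem.Chars.lower tl = tl)
    (hmem : line ∈ PySem.Chars.splitOn ctc ['\n'])
    (h : PySem.Chars.isIn tl line = true) :
    PySem.Chars.isIn tl (PySem.Chars.lower ctc) = true := by
  rw [PySem.Chars.isIn_iff_infix] at h ⊢
  have h1 : PySem.Chars.lower tl <:+: PySem.Chars.lower line := List.IsInfix.map _ h
  rw [hidem] at h1
  exact List.IsInfix.trans h1 (List.IsInfix.map _ (pv_infix_of_mem_splitOn ctc ['\n'] line hmem))

-- every forbidden term, lowered, is a fixed point of lowering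
theorem pv_lower_idem : ∀ t ∈ pvForbidden,
    PySem.Chars.lower (PySem.Chars.lower t.toList) = PySem.Chars.lower t.toList := by decide

-- A's fold as a filter, for any filtered content ctc
theorem pvA_fold_eq (ctc : List Char) :
    pvForbidden.foldl
      (fun found term =>
        let tl := PySem.Chars.lower term.toList
        if PySem.Chars.isIn tl (PySem.Chars.lower ctc) then
          pvInnerA term tl (PySem.Chars.splitOn ctc ['\n']) found
        else found)
      [] =
    pvForbidden.filter (fun t => (PySem.Chars.splitOn ctc ['\n']).any (pvP t)) := by
  rw [PySem.List.foldl_congr_mem pvForbidden _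
      (fun found t =>
        if (PySem.Chars.splitOn ctc ['\n']).any (pvP t) then found ++ [t] else found) []
      (by
        intro acc t ht
        simp only [pvInnerA_eq]
        by_cases hany : (PySem.Chars.splitOn ctc ['\n']).any (pvP t) = true
        · rcases List.any_eq_true.mp hany with ⟨line, hline, hp⟩
          have h1 := ((Bool.and_eq_true _ _).mp hp).1
          have hpre := pv_precheck ctc (PySem.Chars.lower t.toList) line
            (pv_lower_idem t ht) hline h1
          have hany' : (PySem.Chars.splitOn ctc ['\n']).any
              (fun line => PySem.Chars.isIn (PySem.Chars.lower t.toList) line &&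
                !pvCtxAny line) = true := hany
          rw [if_pos hpre, hany', hany]
        · simp only [Bool.not_eq_true] at hany
          have hany' : (PySem.Chars.splitOn ctc ['\n']).any
              (fun line => PySem.Chars.isIn (PySem.Chars.lower t.toList) line &&
                !pvCtxAny line) = false := hany
          rw [hany', hany]
          by_cases hpre : PySem.Chars.isIn (PySem.Chars.lower t.toList)
              (PySem.Chars.lower ctc) = true <;> simp [hpre])]
  have h := PySem.List.foldl_append_if
    (fun t => (PySem.Chars.splitOn ctc ['\n']).any (pvP t))
    (id : String → String) pvForbidden []
  simpa [pvP] using h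

-- ---------- splitOn / join round trip ----------

-- head-only map
def pvMapHead (f : List Char → List Char) : List (List Char) → List (List Char)
  | [] => []
  | a :: t => f a :: t

-- the pieces of a string cut at every newline (structural model of split("\n"))
def pvPieces : List Char → List (List Char)
  | [] => [[]]
  | c :: rest => if c = '\n' then [] :: pvPieces rest else pvMapHead (fun p => c :: p) (pvPieces rest)

theorem pvMapHead_comp (f g : List Char → List Char) (xs : List (List Char)) :
    pvMapHead f (pvMapHead g xs) = pvMapHead (fun p => f (g p)) xs := by
  cases xs <;> simp [pvMapHead]

theorem pvGo_eq_pieces :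
    ∀ (l : List Char) (fuel : Nat) (cur : List Char) (acc : List (List Char)),
      l.length < fuel →
      PySem.Chars.splitOn.go ['\n'] fuel l cur acc =
        acc.reverse ++ pvMapHead (fun p => cur.reverse ++ p) (pvPieces l) := by
  intro l
  induction l with
  | nil =>
      intro fuel cur acc hf
      cases fuel with
      | zero => omega
      | succ f => simp [PySem.Chars.splitOn.go, pvPieces, pvMapHead]
  | cons c rest ih =>
      intro fuel cur acc hf
      cases fuel with
      | zero => omega
      | succ f =>
          simp only [PySem.Chars.splitOn.go]
          by_cases hc : c = '\n'
          · subst hc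
            have hp : (['\n'] : List Char).isPrefixOf ('\n' :: rest) = true := by
              simp [List.isPrefixOf]
            rw [if_pos hp]
            have := ih f [] (cur.reverse :: acc) (by simp at hf ⊢; omega)
            simp only [List.length_cons] at hf
            rw [show List.drop (['\n'] : List Char).length ('\n' :: rest) = rest by simp]
            rw [this]
            have hmh : pvMapHead (fun p => List.reverse [] ++ p) (pvPieces rest) = pvPieces rest := by
              cases h : pvPieces rest <;> simp [pvMapHead]
            rw [hmh]
            simp [pvPieces, pvMapHead]
          · have hp : (['\n'] : List Char).isPrefixOf (c :: rest) = false := by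
              simp only [List.isPrefixOf, Bool.and_true,
                beq_eq_false_iff_ne, ne_eq]
              exact fun h => hc h.symm
            rw [hp]
            simp only [Bool.false_eq_true, if_false]
            have := ih f (c :: cur) acc (by simp at hf ⊢; omega)
            rw [this]
            simp only [pvPieces, if_neg hc, pvMapHead_comp]
            congr 1
            cases h : pvPieces rest <;> simp [pvMapHead]
  
theorem pvSplitOn_eq_pieces (s : List Char) :
    PySem.Chars.splitOn s ['\n'] = pvPieces s := by
  unfold PySem.Chars.splitOn
  rw [pvGo_eq_pieces s (s.length + 1) [] [] (by omega)]
  cases h : pvPieces s <;> simp [pvMapHead]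

theorem pvPieces_no_nl (s : List Char) : ∀ x ∈ pvPieces s, '\n' ∉ x := by
  induction s with
  | nil => simp [pvPieces]
  | cons c rest ih =>
      intro x hx
      simp only [pvPieces] at hx
      by_cases hc : c = '\n'
      · rw [if_pos hc] at hx
        rcases List.mem_cons.mp hx with rfl | hx
        · simp
        · exact ih x hx
      · rw [if_neg hc] at hx
        cases h : pvPieces rest with
        | nil => rw [h] at hx; simp [pvMapHead] at hx
        | cons a t =>
            rw [h] at hx
            simp only [pvMapHead, List.mem_cons] at hx
            rcases hx with rfl | hx
            · intro hmem
              rcases List.mem_cons.mp hmem with h' | h'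
              · exact hc h'.symm
              · exact ih a (by rw [h]; exact List.mem_cons_self) h'
            · exact ih x (by rw [h]; exact List.mem_cons.mpr (Or.inr hx))

theorem pvPieces_append_no_nl (a r : List Char) (ha : '\n' ∉ a) :
    pvPieces (a ++ r) = pvMapHead (fun p => a ++ p) (pvPieces r) := by
  induction a with
  | nil =>
      cases h : pvPieces r <;> simp [pvMapHead, h]
  | cons c rest ih =>
      have hc : c ≠ '\n' := fun h => ha (by simp [h])
      have hrest : '\n' ∉ rest := fun h => ha (by simp [h])
      simp only [List.cons_append, pvPieces, if_neg hc, ih hrest, pvMapHead_comp]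

theorem pvPieces_join (ls : List (List Char)) (hne : ls ≠ [])
    (hnl : ∀ l ∈ ls, '\n' ∉ l) :
    pvPieces (PySem.Chars.join ['\n'] ls) = ls := by
  induction ls with
  | nil => exact absurd rfl hne
  | cons a t ih =>
      cases t with
      | nil =>
          have : PySem.Chars.join ['\n'] [a] = a := by
            simp [PySem.Chars.join, List.intercalate]
          rw [this, show a = a ++ [] by simp, pvPieces_append_no_nl a [] (hnl a (by simp))]
          simp [pvPieces, pvMapHead]
      | cons b t' =>
          have hj : PySem.Chars.join ['\n'] (a :: b :: t') =
              a ++ '\n' :: PySem.Chars.join ['\n'] (b :: t') := by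
            simp [PySem.Chars.join, List.intercalate]
          rw [hj, pvPieces_append_no_nl a _ (hnl a (by simp))]
          have : pvPieces ('\n' :: PySem.Chars.join ['\n'] (b :: t')) =
              [] :: pvPieces (PySem.Chars.join ['\n'] (b :: t')) := by
            simp [pvPieces]
          rw [this, ih (by simp) (fun l hl => hnl l (List.mem_cons.mpr (Or.inr hl)))]
          simp [pvMapHead]

-- ---------- kept lines ----------

-- A's section-filter fold produces exactly the kept lines
theorem pvGces_fold_eq (ls : List (List Char)) :
    ∀ (acc : List (List Char)) (sk : Bool),
      (ls.foldl
        (fun (st : List (List Char) × Bool) line =>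
          let skip := if PySem.Chars.startswith (PySem.Chars.strip line) ['#', '#']
                      then pvHeaders.any (fun h => PySem.Chars.isIn h line) else st.2
          if skip then (st.1, skip) else (st.1 ++ [line], skip))
        (acc, sk)).1 = acc ++ pvKept ls sk := by
  induction ls with
  | nil => simp [pvKept]
  | cons l ls ih =>
      intro acc sk
      simp only [List.foldl_cons, pvKept, pvStep]
      by_cases h : (if PySem.Chars.startswith (PySem.Chars.strip l) ['#', '#']
          then pvHeaders.any (fun h => PySem.Chars.isIn h l) else sk) = true
      · simp only [h, if_true, ih]
      · simp only [Bool.not_eq_true] at h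
        simp only [h, Bool.false_eq_true, if_false, ih]
        simp

theorem pvGces_eq_join (content : List Char) :
    pvGces content pvHeaders =
      PySem.Chars.join ['\n'] (pvKept (PySem.Chars.splitOn content ['\n']) false) := by
  simp only [pvGces]
  rw [pvGces_fold_eq]
  simp

-- members of kept lines come from the line list
theorem pvKept_subset (ls : List (List Char)) :
    ∀ (sk : Bool) (x : List Char), x ∈ pvKept ls sk → x ∈ ls := by
  induction ls with
  | nil => simp [pvKept]
  | cons l ls ih =>
      intro sk x hx
      simp only [pvKept] at hx
      by_cases h : pvStep l sk = true
      · rw [if_pos h] at hx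
        exact List.mem_cons.mpr (Or.inr (ih _ x hx))
      · rw [if_neg h] at hx
        rcases List.mem_cons.mp hx with rfl | hx
        · exact List.mem_cons_self
        · exact List.mem_cons.mpr (Or.inr (ih _ x hx))

-- ---------- B-side characterisation ----------

-- membership in B's per-line inner fold
theorem pv_memInner (line : List Char) :
    ∀ (ts : List (String × List Char)) (s : PySem.Set String) (x : String),
      x ∈ ts.foldl
        (fun found p => if PySem.Chars.isIn p.2 line then PySem.Set.add found p.1 else found) s ↔
      x ∈ s ∨ (∃ p ∈ ts, p.1 = x ∧ PySem.Chars.isIn p.2 line = true) := by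
  intro ts
  induction ts with
  | nil => simp
  | cons t rest ih =>
      intro s x
      simp only [List.foldl_cons, ih, List.mem_cons]
      by_cases h : PySem.Chars.isIn t.2 line = true
      · rw [if_pos h, PySem.Set.mem_add]
        constructor
        · rintro ((hs | rfl) | ⟨p, hp, he, hi⟩)
          · exact Or.inl hs
          · exact Or.inr ⟨t, Or.inl rfl, rfl, h⟩
          · exact Or.inr ⟨p, Or.inr hp, he, hi⟩
        · rintro (hs | ⟨p, hp | hp, he, hi⟩)
          · exact Or.inl (Or.inl hs)
          · subst hp; exact Or.inl (Or.inr he.symm)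
          · exact Or.inr ⟨p, hp, he, hi⟩
      · rw [if_neg h]
        constructor
        · rintro (hs | ⟨p, hp, he, hi⟩)
          · exact Or.inl hs
          · exact Or.inr ⟨p, Or.inr hp, he, hi⟩
        · rintro (hs | ⟨p, hp | hp, he, hi⟩)
          · exact Or.inl hs
          · subst hp; exact absurd hi h
          · exact Or.inr ⟨p, hp, he, hi⟩

-- membership in B's found-set after the streaming pass, in terms of the kept lines
theorem pvB_fold_mem (ls : List (List Char)) :
    ∀ (sk : Bool) (s : PySem.Set String) (x : String),
      x ∈ (ls.foldl
        (fun (st : Bool × PySem.Set String) line =>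
          let skip := if PySem.Chars.startswith (PySem.Chars.strip line) ['#', '#']
                      then pvHeaders.any (fun h => PySem.Chars.isIn h line) else st.1
          if skip || pvCtxAny line then (skip, st.2)
          else (skip,
            (pvForbidden.map (fun term => (term, PySem.Chars.lower term.toList))).foldl
              (fun found p => if PySem.Chars.isIn p.2 line then PySem.Set.add found p.1 else found)
              st.2))
        (sk, s)).2 ↔
      x ∈ s ∨ (x ∈ pvForbidden ∧ (pvKept ls sk).any (pvP x) = true) := by
  induction ls with
  | nil => simp [pvKept]
  | cons line ls ih =>
      intro sk s x
      simp only [List.foldl_cons, pvKept]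
      have hstep : (if PySem.Chars.startswith (PySem.Chars.strip line) ['#', '#']
          then pvHeaders.any (fun h => PySem.Chars.isIn h line) else sk) = pvStep line sk := rfl
      rw [hstep]
      by_cases hsk : pvStep line sk = true
      · simp only [hsk, Bool.true_or, if_true]
        exact ih true s x
      · simp only [Bool.not_eq_true] at hsk
        simp only [hsk, Bool.false_or, Bool.false_eq_true, if_false]
        by_cases hctx : pvCtxAny line = true
        · rw [if_pos hctx, ih]
          have hp : ∀ t : String, pvP t line = false := by
            intro t; simp [pvP, hctx]
          simp [List.any_cons, hp]
        · simp only [Bool.not_eq_true] at hctx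
          rw [hctx]
          simp only [Bool.false_eq_true, if_false]
          rw [ih]
          rw [pv_memInner]
          constructor
          · rintro (⟨hs | ⟨p, hp, he, hi⟩⟩ | ⟨hf, hany⟩)
            · exact Or.inl hs
            · rcases List.mem_map.mp hp with ⟨t, ht, rfl⟩
              subst he
              refine Or.inr ⟨ht, ?_⟩
              simp [List.any_cons, pvP, hi, hctx]
            · refine Or.inr ⟨hf, ?_⟩
              simp [List.any_cons, hany]
          · rintro (hs | ⟨hf, hany⟩)
            · exact Or.inl (Or.inl hs)
            · rcases (List.any_cons ..).symm ▸ hany with h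
              rcases Bool.or_eq_true _ _ |>.mp h with hA | hrest
              · have hi : PySem.Chars.isIn (PySem.Chars.lower x.toList) line = true :=
                  ((Bool.and_eq_true _ _).mp hA).1
                exact Or.inl (Or.inr ⟨(x, PySem.Chars.lower x.toList),
                  List.mem_map.mpr ⟨x, hf, rfl⟩, rfl, hi⟩)
              · exact Or.inr ⟨hf, hrest⟩

-- lower t.toList is nonempty for every forbidden term, so no term matches the empty line
theorem pvP_nil_false : ∀ t ∈ pvForbidden, pvP t [] = false := by decide

-- B's output as a filter over pvForbidden
theorem pvB_filter_eq_gen (st : PySem.Set String) (l : List String) :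
    ((l.map (fun term => (term, PySem.Chars.lower term.toList))).filter
      (fun p => PySem.Set.contains st p.1)).map (fun p => p.1) =
    l.filter (fun t => PySem.Set.contains st t) := by
  induction l with
  | nil => simp
  | cons a l ih =>
      simp only [List.map_cons, List.filter_cons]
      by_cases h : PySem.Set.contains st a = true
      · rw [if_pos h, if_pos h, List.map_cons, ih]
      · rw [if_neg h, if_neg h]
        exact ih

theorem pvB_filter_eq (st : PySem.Set String) :
    ((pvForbidden.map (fun term => (term, PySem.Chars.lower term.toList))).filter
      (fun p => PySem.Set.contains st p.1)).map (fun p => p.1) =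
    pvForbidden.filter (fun t => PySem.Set.contains st t) := pvB_filter_eq_gen st pvForbidden

-- ===== VERDICT helper: the main equivalence =====
theorem check_forbidden_terms_spec : Claim_equal_check_forbidden_terms := by
  intro content _
  unfold Spec_check_forbidden_terms
  simp only [check_forbidden_terms, check_forbidden_terms_alt]
  rw [show (["Explicit Non-Goals".toList, "Explicit Domain Exclusions".toList] :
      List (List Char)) = pvHeaders from rfl]
  rw [pvA_fold_eq]
  rw [pvGces_eq_join]
  set lines := PySem.Chars.splitOn content.toList ['\n'] with hlines
  set K := pvKept lines false with hK
  -- B side: reduce to a filter over pvForbidden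
  rw [pvB_filter_eq]
  have hBmem : ∀ t ∈ pvForbidden,
      (PySem.Set.contains ((lines.foldl
        (fun (st : Bool × PySem.Set String) line =>
          let skip := if PySem.Chars.startswith (PySem.Chars.strip line) ['#', '#']
                      then pvHeaders.any (fun h => PySem.Chars.isIn h line) else st.1
          if skip || pvCtxAny line then (skip, st.2)
          else (skip,
            (pvForbidden.map (fun term => (term, PySem.Chars.lower term.toList))).foldl
              (fun found p => if PySem.Chars.isIn p.2 line then PySem.Set.add found p.1 else found)
              st.2))
        (false, PySem.Set.empty)).2) t) = K.any (pvP t) := by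
    intro t ht
    by_cases h : K.any (pvP t) = true
    · rw [h]
      have := (pvB_fold_mem lines false PySem.Set.empty t).mpr (Or.inr ⟨ht, h⟩)
      exact (PySem.Set.contains_iff _ t).mpr this
    · simp only [Bool.not_eq_true] at h
      rw [h]
      by_contra hc
      rw [Bool.not_eq_false] at hc
      have := (PySem.Set.contains_iff _ t).mp hc
      rcases (pvB_fold_mem lines false PySem.Set.empty t).mp this with hs | ⟨_, hany⟩
      · simp [PySem.Set.empty] at hs
      · rw [h] at hany; exact absurd hany (by simp)
  -- both sides are filters; compare the predicates on members
  have hnl : ∀ l ∈ K, '\n' ∉ l := by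
    intro l hl
    have : l ∈ lines := pvKept_subset lines false l hl
    rw [hlines, pvSplitOn_eq_pieces] at this
    exact pvPieces_no_nl content.toList l this
  have hA : ∀ t ∈ pvForbidden,
      ((PySem.Chars.splitOn (PySem.Chars.join ['\n'] K) ['\n']).any (pvP t)) = K.any (pvP t) := by
    intro t ht
    by_cases hKe : K = []
    · rw [hKe]
      have hj : PySem.Chars.join ['\n'] ([] : List (List Char)) = [] := by
        simp [PySem.Chars.join, List.intercalate]
      rw [hj, pvSplitOn_eq_pieces]
      simp [pvPieces, pvP_nil_false t ht]
    · rw [pvSplitOn_eq_pieces, pvPieces_join K hKe hnl]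
  rw [List.filter_congr hA]
  exact (List.filter_congr hBmem).symm
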